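-- pv_equiv track=rewrite | github.com/chenghuige/pikachu2 | projects/feed/rank/src/tools/clone-title.py | filter_padding
-- ===== SOURCE A (Python) =====
-- def filter_padding(l):
--   if len(l) == 0:
--     return l
--   len_ = len(l)
--   for i in reversed(range(len_)):
--     if l[i] != 0:
--       break
--   return l[:(i + 1)]
-- ===== SOURCE B (Python) =====
-- def filter_padding(l):
--   if len(l) == 0:
--     return l
--   last = 0
--   for i in range(len(l)):
--     if l[i] != 0:
--       last = i
--   return l[:last + 1]
-- ===== Notes on version B (the rewrite author's own statement) =====
-- stated objective: simpler
-- what changed: Replaces A's reversed-range scan with an early break by a single forward pass that tracks the index of the last nonzero element, then takes the prefix up to it.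
import Mathlib
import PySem

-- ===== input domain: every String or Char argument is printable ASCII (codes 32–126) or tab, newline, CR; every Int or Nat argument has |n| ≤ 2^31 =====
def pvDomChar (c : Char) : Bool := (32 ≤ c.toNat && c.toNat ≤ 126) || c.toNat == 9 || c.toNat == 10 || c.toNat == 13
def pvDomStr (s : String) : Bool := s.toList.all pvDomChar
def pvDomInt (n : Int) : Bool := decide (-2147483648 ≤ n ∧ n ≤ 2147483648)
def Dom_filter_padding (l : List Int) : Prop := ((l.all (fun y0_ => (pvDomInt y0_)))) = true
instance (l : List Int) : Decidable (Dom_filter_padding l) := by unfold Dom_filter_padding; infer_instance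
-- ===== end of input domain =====

-- B replaces A's backward scan-with-break by a forward pass tracking the last nonzero index (simpler decomposition, same cost).


-- ===== PORT A =====
-- the reversed-range loop of A: checks l[i], l[i-1], …, breaking at the first nonzero; ends at 0
def fpLoopA (l : List Int) : Nat → Nat
  | 0 => 0
  | i + 1 => if l.getD (i + 1) 0 ≠ 0 then i + 1 else fpLoopA l i

def filter_padding (l : List Int) : List Int :=
  if l.length = 0 then l
  else l.take (fpLoopA l (l.length - 1) + 1)

-- ===== PORT B =====
def filter_padding_alt (l : List Int) : List Int :=
  if l.length = 0 then l
  else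
    let last := (List.range l.length).foldl
      (fun last i => if l.getD i 0 ≠ 0 then i else last) 0
    l.take (last + 1)

-- ===== PRECONDITION & SPEC =====
def Spec_filter_padding (l : List Int) (out : List Int) : Prop := out = filter_padding_alt l
instance (l : List Int) (out : List Int) : Decidable (Spec_filter_padding l out) := by unfold Spec_filter_padding; infer_instance

-- ===== CLAIM (what is proved, stated in full; the proofs are below) =====
def Claim_equal_filter_padding : Prop := ∀ (l : List Int), Dom_filter_padding l → Spec_filter_padding l (filter_padding l)

-- ===== LEMMAS AND PROOFS =====
theorem fpLoopA_eq_foldl (l : List Int) (i : Nat) :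
    fpLoopA l i = (List.range (i + 1)).foldl
      (fun last j => if l.getD j 0 ≠ 0 then j else last) 0 := by
  induction i with
  | zero => simp [fpLoopA, List.range_succ]
  | succ i ih =>
    rw [List.range_succ, List.foldl_append, ← ih]
    simp [fpLoopA]

-- ===== VERDICT (by name: the statement is the Claim_ definition above) =====
theorem filter_padding_spec : Claim_equal_filter_padding := by
  intro l _
  unfold Spec_filter_padding filter_padding filter_padding_alt
  by_cases h : l.length = 0
  · simp [h]
  · have hl : l.length - 1 + 1 = l.length := Nat.succ_pred_eq_of_pos (Nat.pos_of_ne_zero h)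
    simp only [h, if_false, fpLoopA_eq_foldl, hl]
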